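-- pv_equiv track=rewrite | github.com/tymancjo/fourleg | Python/mk2_sim.py | setLegs
-- ===== SOURCE A (Python) =====
-- def setLegs(Alfa, Beta, legs=[1,2,3,4]):
--     """
--     Setting up all legs for the given Alfa and Beta servo angles
--     """
--
--     servos = []
--     if 1 in legs:
--         servos.append(0)
--         servos.append(1)
--     if 2 in legs:
--         servos.append(2)
--         servos.append(3)
--     if 3 in legs:
--         servos.append(4)
--         servos.append(5)
--     if 4 in legs:
--         servos.append(6)
--         servos.append(7)
--
--
--     zeromsg = "<42"
--
--     korekty = []
--     for _ in range(8):
--         korekty.append(0)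
--
--     korekty[2] = 10
--     korekty[5] = 10
--
--     for servo in range(8):
--         if servo in servos:
--             if servo in [0,2,4,6]:
--                 Acor = Beta + korekty[servo]
--                 if servo in [0,1,4,5]:
--                     Bcor = 180 - Acor
--                 else:
--                     Bcor = Acor
--                 zeromsg += f",{int(Bcor)}"
--             else:
--                 Acor = Alfa + korekty[servo]
--                 if servo in [0,1,4,5]:
--                     Bcor = 180 - Acor
--                 else:
--                     Bcor = Acor
--                 zeromsg += f",{int(Bcor)}"
--         else:
--             zeromsg +=",-1"
--
--     zeromsg +=">"
--
--     return zeromsg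
-- ===== SOURCE B (Python) =====
-- def setLegs(Alfa, Beta, legs=[1,2,3,4]):
--     """
--     Setting up all legs for the given Alfa and Beta servo angles
--     """
--     msg = "<42"
--     for i in range(1, 5):
--         if i in legs:
--             b = Beta + (10 if 2 * i - 2 == 2 else 0)
--             a = Alfa + (10 if 2 * i - 1 == 5 else 0)
--             if i in (1, 3):  # legs driven by servos 0,1 and 4,5: inverted sense
--                 b, a = 180 - b, 180 - a
--             msg += f",{int(b)},{int(a)}"
--         else:
--             msg += ",-1,-1"
--     return msg + ">"
-- ===== Notes on version B (the rewrite author's own statement) =====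
-- stated objective: simpler
-- what changed: Replaces A's membership-built servos list, the 8-element korekty correction table and the 8-iteration servo scan with a single loop over the four leg slots in fixed order, emitting both servo values (or two -1s) per slot with inlined corrections.
import Mathlib
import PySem

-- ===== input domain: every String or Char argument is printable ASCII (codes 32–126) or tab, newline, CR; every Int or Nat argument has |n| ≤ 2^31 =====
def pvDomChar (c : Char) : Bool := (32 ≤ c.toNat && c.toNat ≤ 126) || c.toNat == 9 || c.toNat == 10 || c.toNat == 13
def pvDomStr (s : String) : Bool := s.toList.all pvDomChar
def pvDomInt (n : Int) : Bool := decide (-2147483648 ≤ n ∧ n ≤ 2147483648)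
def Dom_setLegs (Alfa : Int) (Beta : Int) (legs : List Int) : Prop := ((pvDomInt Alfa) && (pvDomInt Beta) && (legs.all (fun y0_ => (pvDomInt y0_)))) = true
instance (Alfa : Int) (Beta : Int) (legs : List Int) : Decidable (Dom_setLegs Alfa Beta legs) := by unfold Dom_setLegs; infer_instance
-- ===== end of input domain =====

-- B replaces A's membership-built `servos` list and 8-servo scan by a direct loop over the
-- four leg slots in fixed order (same output; objective: simpler).

-- ===== PORT A =====
def setLegs (Alfa : Int) (Beta : Int) (legs : List Int) : String :=
  let servos : List Int := []
  let servos := if (1:Int) ∈ legs then servos ++ [0] ++ [1] else servos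
  let servos := if (2:Int) ∈ legs then servos ++ [2] ++ [3] else servos
  let servos := if (3:Int) ∈ legs then servos ++ [4] ++ [5] else servos
  let servos := if (4:Int) ∈ legs then servos ++ [6] ++ [7] else servos
  let zeromsg := "<42"
  -- for _ in range(8): korekty.append(0)
  let korekty : List Int := (PySem.List.pyRange 0 8 1).foldl (fun acc _ => acc ++ [0]) []
  let korekty := korekty.set 2 10   -- korekty[2] = 10 (index literal, in range)
  let korekty := korekty.set 5 10   -- korekty[5] = 10
  let zeromsg := (PySem.List.pyRange 0 8 1).foldl (fun zeromsg servo =>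
    if servo ∈ servos then
      if servo ∈ ([0,2,4,6] : List Int) then
        let Acor := Beta + PySem.List.pyGetD korekty servo 0   -- index 0..7, always in range
        let Bcor := if servo ∈ ([0,1,4,5] : List Int) then 180 - Acor else Acor
        zeromsg ++ "," ++ PySem.Int.toStr Bcor   -- int(Bcor) = Bcor (already an int)
      else
        let Acor := Alfa + PySem.List.pyGetD korekty servo 0
        let Bcor := if servo ∈ ([0,1,4,5] : List Int) then 180 - Acor else Acor
        zeromsg ++ "," ++ PySem.Int.toStr Bcor
    else zeromsg ++ ",-1") zeromsg
  zeromsg ++ ">"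

-- ===== PORT B =====
def setLegs_alt (Alfa : Int) (Beta : Int) (legs : List Int) : String :=
  let msg := "<42"
  let msg := (PySem.List.pyRange 1 5 1).foldl (fun msg i =>
    if i ∈ legs then
      let b := Beta + (if 2 * i - 2 = 2 then (10:Int) else 0)
      let a := Alfa + (if 2 * i - 1 = 5 then (10:Int) else 0)
      let p := if i = 1 ∨ i = 3 then (180 - b, 180 - a) else (b, a)
      msg ++ "," ++ PySem.Int.toStr p.1 ++ "," ++ PySem.Int.toStr p.2
    else msg ++ ",-1,-1") msg
  msg ++ ">"

-- ===== PRECONDITION & SPEC =====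
def Spec_setLegs (Alfa : Int) (Beta : Int) (legs : List Int) (out : String) : Prop := out = setLegs_alt Alfa Beta legs
instance (Alfa : Int) (Beta : Int) (legs : List Int) (out : String) : Decidable (Spec_setLegs Alfa Beta legs out) := by unfold Spec_setLegs; infer_instance

-- ===== CLAIM (what is proved, stated in full; the proofs are below) =====
def Claim_equal_setLegs : Prop := ∀ (Alfa : Int) (Beta : Int) (legs : List Int), Dom_setLegs Alfa Beta legs → Spec_setLegs Alfa Beta legs (setLegs Alfa Beta legs)

-- ===== LEMMAS AND PROOFS =====

-- ===== VERDICT (by name: the statement is the Claim_ definition above) =====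
theorem setLegs_spec : Claim_equal_setLegs := by
  intro Alfa Beta legs _
  unfold Spec_setLegs setLegs setLegs_alt
  by_cases h1 : (1:Int) ∈ legs <;> by_cases h2 : (2:Int) ∈ legs <;>
    by_cases h3 : (3:Int) ∈ legs <;> by_cases h4 : (4:Int) ∈ legs <;>
    simp [h1, h2, h3, h4, PySem.List.pyRange, List.range_succ,
      PySem.List.pyGetD, PySem.List.pyGet?, PySem.List.pyIdx?, String.append_assoc]
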